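-- pv_equiv track=rewrite | github.com/rajath-kris/DLWTrustTheModelBros | services/bridge-api/app/sentinel_runtime.py | _coerce_pid_list
-- ===== SOURCE A (Python) =====
-- from typing import Any
--
-- def _coerce_pid_list(raw_value: Any) -> list[int]:
--     if not isinstance(raw_value, list):
--         return []
--     pids: list[int] = []
--     for item in raw_value:
--         try:
--             pid = int(item)
--         except (TypeError, ValueError):
--             continue
--         if pid > 0 and pid not in pids:
--             pids.append(pid)
--     pids.sort()
--     return pids
-- ===== SOURCE B (Python) =====
-- def _coerce_pid_list(raw_value):
--     if not isinstance(raw_value, list):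
--         return []
--     result = []
--     for item in raw_value:
--         try:
--             pid = int(item)
--         except (TypeError, ValueError):
--             continue
--         if pid > 0:
--             result = [x for x in result if x < pid] + [pid] + [x for x in result if x > pid]
--     return result
-- ===== Notes on version B (the rewrite author's own statement) =====
-- stated objective: alternative
-- what changed: B maintains the answer itself as a sorted duplicate-free list, inserting each valid positive pid at its place by splitting the accumulator with two filters (elements equal to pid are dropped, giving dedup by omission), so the final sort and the 'pid not in pids' membership scan both disappear.
import Mathlib
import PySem

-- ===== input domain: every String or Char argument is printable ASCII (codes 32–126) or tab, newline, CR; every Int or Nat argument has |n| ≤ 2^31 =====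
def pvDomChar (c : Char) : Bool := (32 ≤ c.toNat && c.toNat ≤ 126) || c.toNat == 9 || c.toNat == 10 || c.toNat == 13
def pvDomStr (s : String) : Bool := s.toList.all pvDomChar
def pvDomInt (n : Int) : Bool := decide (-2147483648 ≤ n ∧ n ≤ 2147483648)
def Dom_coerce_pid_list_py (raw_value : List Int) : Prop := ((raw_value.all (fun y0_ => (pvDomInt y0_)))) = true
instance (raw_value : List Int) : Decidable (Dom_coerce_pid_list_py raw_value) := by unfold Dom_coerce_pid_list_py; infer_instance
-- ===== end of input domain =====

-- ===== PORT A =====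
-- B keeps the answer sorted and duplicate-free at all times, inserting each positive pid
-- by splitting the accumulator with two filters (equal elements dropped), instead of A's
-- 'pid not in pids' scan followed by a final sort (objective: alternative).
-- The argument is a list of ints, so A's isinstance guard holds, int(item) = item and the
-- try/except never fires.
def coerce_pid_list_py (raw_value : List Int) : List Int :=
  let pids : List Int := raw_value.foldl (fun pids item =>
      let pid := item
      if pid > 0 ∧ pid ∉ pids then pids ++ [pid] else pids) []
  PySem.List.sorted pids (fun x => x) false

-- ===== PORT B =====
def coerce_pid_list_py_alt (raw_value : List Int) : List Int :=
  raw_value.foldl (fun result item =>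
      let pid := item
      if pid > 0 then
        (result.filter (fun x => x < pid)) ++ [pid] ++ (result.filter (fun x => pid < x))
      else result) []

-- ===== PRECONDITION & SPEC =====
def Spec_coerce_pid_list_py (raw_value : List Int) (out : List Int) : Prop := out = coerce_pid_list_py_alt raw_value
instance (raw_value : List Int) (out : List Int) : Decidable (Spec_coerce_pid_list_py raw_value out) := by unfold Spec_coerce_pid_list_py; infer_instance

-- ===== CLAIM (what is proved, stated in full; the proofs are below) =====
def Claim_equal_coerce_pid_list_py : Prop := ∀ (raw_value : List Int), Dom_coerce_pid_list_py raw_value → Spec_coerce_pid_list_py raw_value (coerce_pid_list_py raw_value)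

-- ===== LEMMAS AND PROOFS =====

-- One insertion step of B: splitting a strictly increasing list around pid keeps it
-- strictly increasing, and its members become {pid} ∪ (old members).
theorem binsert_spec (acc : List Int) (pid : Int) (h : acc.Pairwise (· < ·)) :
    ((acc.filter (fun x => x < pid)) ++ [pid] ++ (acc.filter (fun x => pid < x))).Pairwise (· < ·) ∧
    ∀ x, x ∈ (acc.filter (fun x => x < pid)) ++ [pid] ++ (acc.filter (fun x => pid < x)) ↔
      x = pid ∨ x ∈ acc := by
  constructor
  · rw [List.pairwise_append, List.pairwise_append]
    refine ⟨⟨h.filter _, List.pairwise_singleton _ _, ?_⟩, h.filter _, ?_⟩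
    · intro a ha b hb
      simp only [List.mem_singleton] at hb; subst hb
      simpa using (List.mem_filter.mp ha).2
    · intro a ha b hb
      rcases List.mem_append.mp ha with ha | ha
      · have h1 : a < pid := by simpa using (List.mem_filter.mp ha).2
        have h2 : pid < b := by simpa using (List.mem_filter.mp hb).2
        omega
      · simp only [List.mem_singleton] at ha; subst ha
        simpa using (List.mem_filter.mp hb).2
  · intro x
    simp only [List.mem_append, List.mem_filter, List.mem_singleton, decide_eq_true_eq]
    constructor
    · rintro ((⟨hx, _⟩ | rfl) | ⟨hx, _⟩) <;> tauto
    · rintro (rfl | hx)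
      · tauto
      · rcases lt_trichotomy x pid with hlt | rfl | hgt <;> tauto

-- B's fold keeps the accumulator strictly increasing, with members = positives seen so far.
theorem bfold_spec (raw : List Int) : ∀ (acc : List Int), acc.Pairwise (· < ·) →
    (raw.foldl (fun result item =>
        if item > 0 then
          (result.filter (fun x => x < item)) ++ [item] ++ (result.filter (fun x => item < x))
        else result) acc).Pairwise (· < ·) ∧
    ∀ x, x ∈ raw.foldl (fun result item =>
        if item > 0 then
          (result.filter (fun x => x < item)) ++ [item] ++ (result.filter (fun x => item < x))
        else result) acc ↔ x ∈ acc ∨ (x ∈ raw ∧ 0 < x) := by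
  induction raw with
  | nil => intro acc h; exact ⟨h, by simp⟩
  | cons item rest ih =>
    intro acc h
    simp only [List.foldl_cons]
    by_cases hc : item > 0
    · rw [if_pos hc]
      obtain ⟨hp, hm⟩ := binsert_spec acc item h
      obtain ⟨hp', hm'⟩ := ih _ hp
      refine ⟨hp', fun x => ?_⟩
      rw [hm' x, hm x]
      simp only [List.mem_cons]
      constructor
      · rintro ((rfl | hx) | ⟨hx, hpos⟩)
        · exact Or.inr ⟨Or.inl rfl, hc⟩
        · exact Or.inl hx
        · exact Or.inr ⟨Or.inr hx, hpos⟩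
      · rintro (hx | ⟨(rfl | hx), hpos⟩)
        · exact Or.inl (Or.inr hx)
        · exact Or.inl (Or.inl rfl)
        · exact Or.inr ⟨hx, hpos⟩
    · rw [if_neg hc]
      obtain ⟨hp, hm⟩ := ih acc h
      refine ⟨hp, fun x => ?_⟩
      rw [hm x]
      simp only [List.mem_cons]
      constructor
      · rintro (hx | ⟨hx, hpos⟩)
        · exact Or.inl hx
        · exact Or.inr ⟨Or.inr hx, hpos⟩
      · rintro (hx | ⟨(rfl | hx), hpos⟩)
        · exact Or.inl hx
        · exact absurd hpos hc
        · exact Or.inr ⟨hx, hpos⟩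

-- Two strictly increasing lists with the same members are equal.
theorem eq_of_pairwise_lt_of_mem_iff (l1 l2 : List Int)
    (h1 : l1.Pairwise (· < ·)) (h2 : l2.Pairwise (· < ·))
    (hm : ∀ x, x ∈ l1 ↔ x ∈ l2) : l1 = l2 := by
  have n1 : l1.Nodup := h1.imp (fun h => ne_of_lt h)
  have n2 : l2.Nodup := h2.imp (fun h => ne_of_lt h)
  have hperm : l1.Perm l2 := (List.perm_ext_iff_of_nodup n1 n2).mpr hm
  exact hperm.eq_of_pairwise (fun a b _ _ hab hba => le_antisymm hab hba)
    (h1.imp le_of_lt) (h2.imp le_of_lt)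

-- A's accumulator: nodup, and membership = "positive element of the input".
theorem afold_spec (raw : List Int) : ∀ (acc : List Int), acc.Nodup →
    (raw.foldl (fun pids item => if item > 0 ∧ item ∉ pids then pids ++ [item] else pids) acc).Nodup ∧
    ∀ x, x ∈ raw.foldl (fun pids item => if item > 0 ∧ item ∉ pids then pids ++ [item] else pids) acc ↔
      x ∈ acc ∨ (x ∈ raw ∧ 0 < x) := by
  induction raw with
  | nil => intro acc h; exact ⟨h, by simp⟩
  | cons item rest ih =>
    intro acc h
    simp only [List.foldl_cons]
    by_cases hc : item > 0 ∧ item ∉ acc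
    · rw [if_pos hc]
      obtain ⟨hn, hm⟩ := ih (acc ++ [item])
        (by rw [List.nodup_append]; exact ⟨h, List.nodup_singleton _, by
              intro a ha b hb; simp at hb; subst hb; exact fun he => hc.2 (he ▸ ha)⟩)
      refine ⟨hn, fun x => ?_⟩
      rw [hm x]
      simp only [List.mem_append, List.mem_cons, List.not_mem_nil, or_false]
      constructor
      · rintro ((h|rfl)|⟨h1,h2⟩)
        · exact Or.inl h
        · exact Or.inr ⟨Or.inl rfl, hc.1⟩
        · exact Or.inr ⟨Or.inr h1, h2⟩
      · rintro (h|⟨(rfl|h1),h2⟩)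
        · exact Or.inl (Or.inl h)
        · exact Or.inl (Or.inr rfl)
        · exact Or.inr ⟨h1, h2⟩
    · rw [if_neg hc]
      obtain ⟨hn, hm⟩ := ih acc h
      refine ⟨hn, fun x => ?_⟩
      rw [hm x]
      simp only [List.mem_cons]
      constructor
      · rintro (h|⟨h1,h2⟩)
        · exact Or.inl h
        · exact Or.inr ⟨Or.inr h1, h2⟩
      · rintro (h|⟨(rfl|h1),h2⟩)
        · exact Or.inl h
        · push Not at hc
          exact Or.inl (hc h2)
        · exact Or.inr ⟨h1, h2⟩

-- ===== VERDICT (by name: the statement is the Claim_ definition above) =====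
theorem coerce_pid_list_py_spec : Claim_equal_coerce_pid_list_py := by
  intro raw _
  unfold Spec_coerce_pid_list_py coerce_pid_list_py coerce_pid_list_py_alt
  obtain ⟨hnA, hmA⟩ := afold_spec raw [] List.nodup_nil
  set pidsA := raw.foldl (fun pids item => if item > 0 ∧ item ∉ pids then pids ++ [item] else pids) [] with hA
  -- the A side is strictly increasing
  have hsortA : (PySem.List.sorted pidsA (fun x => x) false).Pairwise (· < ·) := by
    have hle := PySem.List.sorted_pairwise pidsA (fun x => x)
    have hnd : (PySem.List.sorted pidsA (fun x => x) false).Nodup :=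
      (PySem.List.sorted_perm pidsA (fun x => x) false).symm.nodup hnA
    exact (hle.and hnd).imp (fun h => lt_of_le_of_ne h.1 h.2)
  obtain ⟨hpB, hmB⟩ := bfold_spec raw [] List.Pairwise.nil
  refine eq_of_pairwise_lt_of_mem_iff _ _ hsortA hpB ?_
  intro x
  rw [PySem.List.mem_sorted, hmA x, hmB x]
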